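-- pv_equiv track=rewrite | github.com/MrBrantCode/unitest_baseline | mut_generate/mist_train_taco/taco_1478/solution.py | calculate_slimming_days
-- ===== SOURCE A (Python) =====
-- def calculate_slimming_days(S, T, D, W):
--     S -= T  # Adjust S to be relative to T
--     F = sum(W)  # Total weight change over one full cycle
--
--     if F >= 0:
--         # If the total weight change per cycle is non-negative, check if it can end within one cycle
--         su = S
--         for i, w in enumerate(W):
--             su += w
--             if su <= 0:
--                 return i + 1
--         return -1
--
--     # If the total weight change per cycle is negative, calculate the minimum days required
--     su = 0
--     mi = 0
--     for d in W:
--         su += d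
--         mi = min(mi, su)
--
--     k = max((S + mi - F - 1) // -F, 0)
--     S += k * F
--
--     for i, w in enumerate(W):
--         S += w
--         if S <= 0:
--             return i + 1 + k * D
--
--     return -1
-- ===== SOURCE B (Python) =====
-- def calculate_slimming_days(S, T, D, W):
--     S -= T
--     F = sum(W)
--     # For each position r (prefix sum p), the smallest cycle count q >= 0 with
--     # q*F + p <= -S; pick the position minimizing (q, r) lexicographically.
--     best = None  # (q, r)
--     p = 0
--     for r, w in enumerate(W):
--         p += w
--         need = S + p
--         if need <= 0:
--             q = 0
--         elif F < 0:
--             q = -((-need) // (-F))  # ceil(need / -F)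
--         else:
--             continue  # this position never reaches <= 0
--         if best is None or q < best[0]:
--             best = (q, r)
--     if best is None:
--         return -1
--     q, r = best
--     return q * D + r + 1
-- ===== Notes on version B (the rewrite author's own statement) =====
-- stated objective: alternative
-- what changed: B drops A's prefix-minimum pass, global cycle-skip k and second rescan; instead it computes for each position r its own smallest viable cycle count q_r by a per-position ceiling division and returns the lexicographic argmin (q_r, r) in a single pass.
import Mathlib
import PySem

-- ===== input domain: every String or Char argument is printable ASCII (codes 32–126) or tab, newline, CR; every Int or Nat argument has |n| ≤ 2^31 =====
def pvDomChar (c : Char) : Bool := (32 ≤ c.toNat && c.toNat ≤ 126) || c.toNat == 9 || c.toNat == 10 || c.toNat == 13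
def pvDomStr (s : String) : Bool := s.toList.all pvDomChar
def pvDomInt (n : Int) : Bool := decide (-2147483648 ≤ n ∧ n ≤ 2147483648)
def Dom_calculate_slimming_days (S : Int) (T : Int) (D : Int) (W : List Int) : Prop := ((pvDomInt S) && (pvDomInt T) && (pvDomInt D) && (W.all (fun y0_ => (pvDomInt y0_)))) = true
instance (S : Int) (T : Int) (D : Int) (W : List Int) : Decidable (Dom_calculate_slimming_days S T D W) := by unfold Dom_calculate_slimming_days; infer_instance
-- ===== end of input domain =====

-- B replaces A's prefix-minimum pass, global cycle-skip k and rescan by a per-position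
-- smallest-cycle-count (ceiling division) and a single lexicographic argmin pass; objective: alternative.


-- ===== PORT A =====
-- first loop of A: su accumulates the weights, returns i+1 at the first su ≤ 0, else -1
def aLoop1 : Int → List Int → Int → Int
  | _, [], _ => -1
  | su, w :: ws, i =>
      let su' := su + w
      if su' ≤ 0 then i + 1 else aLoop1 su' ws (i + 1)

-- last loop of A: like the first but returns i + 1 + kD
def aLoop2 : Int → Int → List Int → Int → Int
  | _, _, [], _ => -1
  | su, kD, w :: ws, i =>
      let su' := su + w
      if su' ≤ 0 then i + 1 + kD else aLoop2 su' kD ws (i + 1)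

def calculate_slimming_days (S : Int) (T : Int) (D : Int) (W : List Int) : Int :=
  let S1 := S - T
  let F := W.sum
  if F ≥ 0 then
    aLoop1 S1 W 0
  else
    let sm := W.foldl (fun (p : Int × Int) d => (p.1 + d, min p.2 (p.1 + d))) (0, 0)
    let mi := sm.2
    let k := max (PySem.Int.floordiv (S1 + mi - F - 1) (-F)) 0
    aLoop2 (S1 + k * F) (k * D) W 0

-- ===== PORT B =====
-- python: `if best is None or q < best[0]: best = (q, r)`
def bUpd (best : Option (Int × Int)) (q : Int) (r : Int) : Option (Int × Int) :=
  match best with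
  | none => some (q, r)
  | some b => if q < b.1 then some (q, r) else some b

-- B's single pass: prefix p, index r, per-position cycle count q, lexicographic best
def bLoop (S F : Int) : Option (Int × Int) → Int → Int → List Int → Option (Int × Int)
  | best, _, _, [] => best
  | best, p, r, w :: ws =>
      let p' := p + w
      let need := S + p'
      if need ≤ 0 then
        bLoop S F (bUpd best 0 r) p' (r + 1) ws
      else if F < 0 then
        bLoop S F (bUpd best (-(PySem.Int.floordiv (-need) (-F))) r) p' (r + 1) ws
      else
        bLoop S F best p' (r + 1) ws

def calculate_slimming_days_alt (S : Int) (T : Int) (D : Int) (W : List Int) : Int :=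
  let S1 := S - T
  let F := W.sum
  match bLoop S1 F none 0 0 W with
  | none => -1
  | some (q, r) => q * D + r + 1

-- ===== PRECONDITION & SPEC =====
def Spec_calculate_slimming_days (S : Int) (T : Int) (D : Int) (W : List Int) (out : Int) : Prop := out = calculate_slimming_days_alt S T D W
instance (S : Int) (T : Int) (D : Int) (W : List Int) (out : Int) : Decidable (Spec_calculate_slimming_days S T D W out) := by unfold Spec_calculate_slimming_days; infer_instance

-- ===== CLAIM (what is proved, stated in full; the proofs are below) =====
def Claim_equal_calculate_slimming_days : Prop := ∀ (S : Int) (T : Int) (D : Int) (W : List Int), Dom_calculate_slimming_days S T D W → Spec_calculate_slimming_days S T D W (calculate_slimming_days S T D W)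

-- ===== LEMMAS AND PROOFS =====

-- the q value B computes for a prefix x (when F < 0; for S + x ≤ 0 in any case)
def qvOf (S1 F x : Int) : Int := if S1 + x ≤ 0 then 0 else -(PySem.Int.floordiv (-(S1 + x)) (-F))

-- list of prefix sums of ws starting from p
def prefixes : Int → List Int → List Int
  | _, [] => []
  | p, w :: ws => (p + w) :: prefixes (p + w) ws

-- spec-side rendering of B's strict-min fold, over the prefix-value list
def bSpec (S1 F : Int) : Int × Int → Int → List Int → Int × Int
  | b, _, [] => b
  | b, i, x :: xs => bSpec S1 F (if qvOf S1 F x < b.1 then (qvOf S1 F x, i) else b) (i + 1) xs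

-- first index whose q-value is ≤ k
def firstAt (S1 F k : Int) : List Int → Option Nat
  | [] => none
  | x :: xs => if qvOf S1 F x ≤ k then some 0 else (firstAt S1 F k xs).map (· + 1)

-- Galois characterisation of B's per-position cycle count: qvOf is the least q with 0 ≤ q and S1 + x ≤ q·(-F)
theorem qle (S1 F x q : Int) (hb : 0 < -F) :
    qvOf S1 F x ≤ q ↔ (0 ≤ q ∧ S1 + x ≤ q * (-F)) := by
  unfold qvOf
  split_ifs with h
  · constructor
    · intro hq; exact ⟨hq, le_trans h (by positivity)⟩
    · exact fun hq => hq.1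
  · push_neg at h
    rw [neg_le (b := q), PySem.Int.le_floordiv_iff_mul_le hb]
    constructor
    · intro hq
      have h2 : S1 + x ≤ q * (-F) := by nlinarith
      refine ⟨?_, h2⟩
      nlinarith
    · intro hq; nlinarith [hq.2]

theorem qv_nonneg (S1 F x : Int) (hb : 0 < -F) : 0 ≤ qvOf S1 F x :=
  ((qle S1 F x (qvOf S1 F x) hb).1 le_rfl).1

-- Galois characterisation of A's cycle-skip count k
theorem kle (S1 F mi q : Int) (hb : 0 < -F) :
    max (PySem.Int.floordiv (S1 + mi - F - 1) (-F)) 0 ≤ q ↔ (0 ≤ q ∧ S1 + mi ≤ q * (-F)) := by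
  rw [max_le_iff, and_comm, and_congr_right_iff]
  intro hq
  constructor
  · intro hfd
    by_contra hc
    push_neg at hc
    have h1 : q + 1 ≤ PySem.Int.floordiv (S1 + mi - F - 1) (-F) := by
      rw [PySem.Int.le_floordiv_iff_mul_le hb]; nlinarith
    omega
  · intro hle
    by_contra hc
    push_neg at hc
    have h1 : q + 1 ≤ PySem.Int.floordiv (S1 + mi - F - 1) (-F) := hc
    rw [PySem.Int.le_floordiv_iff_mul_le hb] at h1
    nlinarith

-- ===== A-side characterisations =====

-- A's mi-fold computes a foldl-min over the prefix list
theorem miFold (ws : List Int) : ∀ (p m : Int),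
    (ws.foldl (fun (a : Int × Int) d => (a.1 + d, min a.2 (a.1 + d))) (p, m)).2
      = (prefixes p ws).foldl min m := by
  induction ws with
  | nil => intro p m; simp [prefixes]
  | cons w ws ih => intro p m; simp only [List.foldl_cons, prefixes]; exact ih (p + w) (min m (p + w))

theorem minfold_le_mem (l : List Int) : ∀ (m x : Int), x ∈ l → l.foldl min m ≤ x := by
  induction l with
  | nil => intro m x hx; cases hx
  | cons y ys ih =>
      intro m x hx
      simp only [List.foldl_cons]
      rcases List.mem_cons.1 hx with h | h
      · subst h
        calc ys.foldl min (min m x) ≤ min m x := by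
              clear hx ih
              induction ys generalizing m x with
              | nil => simp
              | cons z zs ihz => simp only [List.foldl_cons]
                                 exact le_trans (ihz (min m x) z) (min_le_left _ _)
          _ ≤ x := min_le_right _ _
      · exact ih (min m y) x h

theorem minfold_cases (l : List Int) : ∀ (m : Int), l.foldl min m = m ∨ l.foldl min m ∈ l := by
  induction l with
  | nil => intro m; left; rfl
  | cons y ys ih =>
      intro m
      simp only [List.foldl_cons]
      rcases ih (min m y) with h | h
      · rcases le_total m y with hmy | hmy
        · left; rw [h, min_eq_left hmy]
        · right; rw [h, min_eq_right hmy]; exact List.mem_cons_self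
      · right; exact List.mem_cons_of_mem _ h

-- the total sum is a member of the prefix list (ws ≠ [])
theorem prefixes_last (ws : List Int) : ∀ (p : Int), ws ≠ [] → p + ws.sum ∈ prefixes p ws := by
  induction ws with
  | nil => intro p h; exact absurd rfl h
  | cons w ws ih =>
      intro p _
      cases ws with
      | nil => simp [prefixes]
      | cons v vs =>
          have h1 := ih (p + w) (by simp)
          have h2 : p + (w :: v :: vs).sum = p + w + (v :: vs).sum := by
            simp [List.sum_cons]; ring
          rw [h2]
          exact List.mem_cons_of_mem _ h1

-- A's second loop returns according to the first position whose q-value is ≤ k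
theorem Achar (S1 F k kD : Int) (hb : 0 < -F) (hk : 0 ≤ k) (ws : List Int) : ∀ (p i : Int),
    aLoop2 (S1 + k * F + p) kD ws i =
      (match firstAt S1 F k (prefixes p ws) with
       | some j => i + (j : Int) + 1 + kD
       | none => -1) := by
  induction ws with
  | nil => intro p i; simp [aLoop2, prefixes, firstAt]
  | cons w ws ih =>
      intro p i
      simp only [aLoop2, prefixes, firstAt]
      have hcond : (S1 + k * F + p + w ≤ 0) ↔ qvOf S1 F (p + w) ≤ k := by
        rw [qle S1 F (p + w) k hb]
        constructor
        · intro h; exact ⟨hk, by nlinarith⟩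
        · intro h; nlinarith [h.2]
      by_cases h : qvOf S1 F (p + w) ≤ k
      · rw [if_pos (hcond.2 h), if_pos h]
        simp
      · rw [if_neg (fun hc => h (hcond.1 hc)), if_neg h]
        have h2 : S1 + k * F + p + w = S1 + k * F + (p + w) := by ring
        rw [h2, ih (p + w) (i + 1)]
        cases hfa : firstAt S1 F k (prefixes (p + w) ws) with
        | none => simp
        | some j => simp; ring

-- ===== B-side characterisations =====

-- with F < 0, B's loop is the strict-min fold over the prefix-value list
theorem bridge (S1 F : Int) (hF : F < 0) (ws : List Int) : ∀ (p i : Int) (b : Int × Int),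
    bLoop S1 F (some b) p i ws = some (bSpec S1 F b i (prefixes p ws)) := by
  induction ws with
  | nil => intro p i b; simp [bLoop, bSpec, prefixes]
  | cons w ws ih =>
      intro p i b
      simp only [bLoop, prefixes, bSpec]
      by_cases h : S1 + (p + w) ≤ 0
      · rw [if_pos h]
        have hq : qvOf S1 F (p + w) = 0 := by unfold qvOf; rw [if_pos h]
        rw [hq]
        simp only [bUpd]
        split_ifs <;> exact ih (p + w) (i + 1) _
      · rw [if_neg h, if_pos hF]
        have hq : qvOf S1 F (p + w) = -(PySem.Int.floordiv (-(S1 + (p + w))) (-F)) := by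
          unfold qvOf; rw [if_neg h]
        rw [← hq]
        simp only [bUpd]
        split_ifs <;> exact ih (p + w) (i + 1) _

-- starting from none, the first element seeds the best pair (F < 0)
theorem bstart (S1 F : Int) (hF : F < 0) (w : Int) (ws : List Int) :
    bLoop S1 F none 0 0 (w :: ws) = some (bSpec S1 F (qvOf S1 F w, 0) 0 (prefixes 0 (w :: ws))) := by
  simp only [bLoop, prefixes, bSpec, zero_add]
  rw [if_neg (lt_irrefl _)]
  by_cases h : S1 + w ≤ 0
  · rw [if_pos h]
    have hq : qvOf S1 F w = 0 := by unfold qvOf; rw [if_pos h]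
    rw [hq]
    simp only [bUpd]
    exact bridge S1 F hF ws w 1 _
  · rw [if_neg h, if_pos hF]
    have hq : qvOf S1 F w = -(PySem.Int.floordiv (-(S1 + w)) (-F)) := by unfold qvOf; rw [if_neg h]
    rw [← hq]
    simp only [bUpd]
    exact bridge S1 F hF ws w 1 _

-- core characterisation of the strict-min fold
theorem core (S1 F : Int) (l : List Int) : ∀ (b : Int × Int) (i : Int),
    (bSpec S1 F b i l).1 ≤ b.1 ∧
    (∀ x ∈ l, (bSpec S1 F b i l).1 ≤ qvOf S1 F x) ∧
    ((bSpec S1 F b i l = b ∧ ∀ x ∈ l, b.1 ≤ qvOf S1 F x) ∨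
     ((bSpec S1 F b i l).1 < b.1 ∧
      ∃ j : Nat, firstAt S1 F (bSpec S1 F b i l).1 l = some j ∧ (bSpec S1 F b i l).2 = i + (j : Int))) := by
  induction l with
  | nil => intro b i; refine ⟨le_rfl, by simp, Or.inl ⟨rfl, by simp⟩⟩
  | cons x xs ih =>
      intro b i
      simp only [bSpec]
      by_cases h : qvOf S1 F x < b.1
      · rw [if_pos h]
        obtain ⟨h1, h2, h3⟩ := ih (qvOf S1 F x, i) (i + 1)
        refine ⟨le_trans h1 (le_of_lt h), ?_, ?_⟩
        · intro y hy
          rcases List.mem_cons.1 hy with rfl | hy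
          · exact h1
          · exact h2 y hy
        · right
          rcases h3 with ⟨heq, hall⟩ | ⟨hlt, j, hfa, hidx⟩
          · refine ⟨lt_of_le_of_lt h1 h, 0, ?_, ?_⟩
            · simp [firstAt, heq]
            · simp [heq]
          · refine ⟨lt_trans hlt h, j + 1, ?_, ?_⟩
            · simp only [firstAt]
              rw [if_neg (not_le.2 hlt), hfa]
              rfl
            · rw [hidx]; push_cast; ring
      · rw [if_neg h]
        push_neg at h
        obtain ⟨h1, h2, h3⟩ := ih b (i + 1)
        refine ⟨h1, ?_, ?_⟩
        · intro y hy
          rcases List.mem_cons.1 hy with rfl | hy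
          · exact le_trans h1 h
          · exact h2 y hy
        · rcases h3 with ⟨heq, hall⟩ | ⟨hlt, j, hfa, hidx⟩
          · left
            refine ⟨heq, ?_⟩
            intro y hy
            rcases List.mem_cons.1 hy with rfl | hy
            · exact h
            · exact hall y hy
          · right
            refine ⟨hlt, j + 1, ?_, ?_⟩
            · simp only [firstAt]
              rw [if_neg (not_le.2 (lt_of_lt_of_le hlt h)), hfa]
              rfl
            · rw [hidx]; push_cast; ring

-- the fold's value is the q-value of some member (or of the seed)
theorem core_mem (S1 F : Int) (l : List Int) : ∀ (b : Int × Int) (i : Int),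
    (bSpec S1 F b i l).1 = b.1 ∨ ∃ x ∈ l, (bSpec S1 F b i l).1 = qvOf S1 F x := by
  induction l with
  | nil => intro b i; left; rfl
  | cons x xs ih =>
      intro b i
      simp only [bSpec]
      by_cases h : qvOf S1 F x < b.1
      · rw [if_pos h]
        rcases ih (qvOf S1 F x, i) (i + 1) with h1 | ⟨y, hy, h1⟩
        · right; exact ⟨x, List.mem_cons_self, h1⟩
        · right; exact ⟨y, List.mem_cons_of_mem _ hy, h1⟩
      · rw [if_neg h]
        rcases ih b (i + 1) with h1 | ⟨y, hy, h1⟩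
        · left; exact h1
        · right; exact ⟨y, List.mem_cons_of_mem _ hy, h1⟩

-- ===== main equivalence =====

def miOf (W : List Int) : Int :=
  (W.foldl (fun (p : Int × Int) d => (p.1 + d, min p.2 (p.1 + d))) (0, 0)).2

def kOf (S1 : Int) (W : List Int) : Int :=
  max (PySem.Int.floordiv (S1 + miOf W - W.sum - 1) (-W.sum)) 0

theorem A_unfold (S T D : Int) (W : List Int) :
    calculate_slimming_days S T D W =
      if W.sum ≥ 0 then aLoop1 (S - T) W 0
      else aLoop2 ((S - T) + kOf (S - T) W * W.sum) (kOf (S - T) W * D) W 0 := rfl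

theorem B_unfold (S T D : Int) (W : List Int) :
    calculate_slimming_days_alt S T D W =
      (match bLoop (S - T) W.sum none 0 0 W with
       | none => (-1 : Int)
       | some (q, r) => q * D + r + 1) := rfl

-- with F ≥ 0, a best pair (0, r0) can never be improved
theorem stuck (S1 F : Int) (hF : 0 ≤ F) (ws : List Int) : ∀ (p i r0 : Int),
    bLoop S1 F (some (0, r0)) p i ws = some (0, r0) := by
  induction ws with
  | nil => intro p i r0; rfl
  | cons w ws ih =>
      intro p i r0
      simp only [bLoop]
      by_cases h : S1 + (p + w) ≤ 0
      · rw [if_pos h]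
        have hred : bUpd (some ((0 : Int), r0)) 0 i = some (0, r0) := by simp [bUpd]
        rw [hred]
        exact ih (p + w) (i + 1) r0
      · rw [if_neg h, if_neg (not_lt.2 hF)]
        exact ih (p + w) (i + 1) r0

-- with F ≥ 0, B's loop returns exactly like A's first loop
theorem key (S1 F D : Int) (hF : 0 ≤ F) (ws : List Int) : ∀ (p i : Int),
    (match bLoop S1 F none p i ws with
     | none => (-1 : Int)
     | some (q, r) => q * D + r + 1) = aLoop1 (S1 + p) ws i := by
  induction ws with
  | nil => intro p i; rfl
  | cons w ws ih =>
      intro p i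
      simp only [bLoop, aLoop1]
      by_cases h : S1 + (p + w) ≤ 0
      · have hA : S1 + p + w ≤ 0 := by linarith
        rw [if_pos h, if_pos hA]
        have hred : bUpd none 0 i = some (0, i) := rfl
        rw [hred, stuck S1 F hF ws (p + w) (i + 1) i]
        show (0 : Int) * D + i + 1 = i + 1
        ring
      · have hA : ¬ (S1 + p + w ≤ 0) := fun hc => h (by linarith)
        rw [if_neg h, if_neg (not_lt.2 hF), if_neg hA]
        have h2 : S1 + p + w = S1 + (p + w) := by ring
        rw [h2]
        exact ih (p + w) (i + 1)

theorem main_eq (S T D : Int) (W : List Int) :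
    calculate_slimming_days S T D W = calculate_slimming_days_alt S T D W := by
  rw [A_unfold, B_unfold]
  set S1 := S - T with hS1
  by_cases hF : W.sum ≥ 0
  · rw [if_pos hF, key S1 W.sum D hF W 0 0]
    norm_num
  · rw [if_neg hF]
    push_neg at hF
    have hb : 0 < -W.sum := by linarith
    cases W with
    | nil => simp at hF
    | cons w ws =>
        set F := (w :: ws).sum with hFdef
        set mi := miOf (w :: ws) with hmi
        set k := kOf S1 (w :: ws) with hk
        have hk0 : 0 ≤ k := le_max_right _ _
        have hkle : ∀ q, k ≤ q ↔ (0 ≤ q ∧ S1 + mi ≤ q * (-F)) := fun q => kle S1 F mi q hb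
        -- mi is the foldl-min of the prefix list seeded with 0
        have hmi2 : mi = (prefixes 0 (w :: ws)).foldl min 0 := miFold (w :: ws) 0 0
        -- mi is a member of the prefix list (since the last prefix is F < 0)
        have hlastmem : F ∈ prefixes 0 (w :: ws) := by
          have := prefixes_last (w :: ws) 0 (by simp)
          rwa [zero_add] at this
        have hmimem : mi ∈ prefixes 0 (w :: ws) := by
          rcases minfold_cases (prefixes 0 (w :: ws)) 0 with h | h
          · exfalso
            have h2 := minfold_le_mem (prefixes 0 (w :: ws)) 0 F hlastmem
            rw [← hmi2] at h2
            rw [← hmi2] at h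
            rw [h] at h2
            linarith
          · rwa [← hmi2] at h
        have hmile : ∀ x ∈ prefixes 0 (w :: ws), mi ≤ x := by
          intro x hx
          have := minfold_le_mem (prefixes 0 (w :: ws)) 0 x hx
          rwa [← hmi2] at this
        -- B's result via the strict-min fold
        rw [bstart S1 F hF w ws]
        set r := bSpec S1 F (qvOf S1 F w, 0) 0 (prefixes 0 (w :: ws)) with hr
        have hwmem : w ∈ prefixes 0 (w :: ws) := by simp [prefixes]
        obtain ⟨hc1, hc2, hc3⟩ := core S1 F (prefixes 0 (w :: ws)) (qvOf S1 F w, 0) 0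
        rw [← hr] at hc1 hc2 hc3
        have hmem := core_mem S1 F (prefixes 0 (w :: ws)) (qvOf S1 F w, 0) 0
        rw [← hr] at hmem
        have hm_nonneg : 0 ≤ r.1 := by
          rcases hmem with h | ⟨x, hx, h⟩
          · rw [h]; exact qv_nonneg S1 F w hb
          · rw [h]; exact qv_nonneg S1 F x hb
        -- r.1 = k
        have hkm : k = r.1 := by
          apply le_antisymm
          · rw [hkle r.1]
            refine ⟨hm_nonneg, ?_⟩
            rcases hmem with h | ⟨x, hx, h⟩
            · have hq := ((qle S1 F w (qvOf S1 F w) hb).1 le_rfl).2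
              have hle := hmile w hwmem
              rw [h]; nlinarith
            · have hq := ((qle S1 F x (qvOf S1 F x) hb).1 le_rfl).2
              have hle := hmile x hx
              rw [h]; nlinarith
          · have hqmi : qvOf S1 F mi ≤ k := by
              rw [qle S1 F mi k hb]
              exact ⟨hk0, ((hkle k).1 le_rfl).2⟩
            exact le_trans (hc2 mi hmimem) hqmi
        -- A's result via firstAt
        have hA := Achar S1 F k (k * D) hb hk0 (w :: ws) 0 0
        rw [add_zero] at hA
        rw [hA]
        rcases hc3 with ⟨heq, hall⟩ | ⟨hlt, j, hfa, hidx⟩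
        · -- the fold never improved: the first position already attains k
          have hfa : firstAt S1 F k (prefixes 0 (w :: ws)) = some 0 := by
            simp only [prefixes, firstAt, zero_add]
            rw [if_pos (by rw [hkm, heq])]
          rw [hfa]
          show (0 : Int) + (0 : Nat) + 1 + k * D = r.1 * D + r.2 + 1
          rw [heq]
          show (0 : Int) + (0 : Nat) + 1 + k * D = (qvOf S1 F w) * D + 0 + 1
          rw [hkm, heq]
          push_cast
          ring
        · rw [hkm, hfa]
          show (0 : Int) + (j : Int) + 1 + r.1 * D = r.1 * D + r.2 + 1
          rw [hidx]
          ring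

-- ===== VERDICT (by name: the statement is the Claim_ definition above) =====
theorem calculate_slimming_days_spec : Claim_equal_calculate_slimming_days := by
  intro S T D W _
  unfold Spec_calculate_slimming_days
  exact main_eq S T D W
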